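-- pv_equiv track=rewrite | github.com/ganjalipour/RAG | rag_flow/conversation_enhancer.py | prepare_conversation_context
-- ===== SOURCE A (Python) =====
-- from typing import Any, Dict, List
--
-- def prepare_conversation_context(
--     conversation_history: List[Dict[str, Any]], max_context_length: int = 2000
-- ) -> str:
--     """
--     Prepare conversation context for RAG system
--
--     Args:
--         conversation_history: List of conversation messages
--         max_context_length: Maximum length of context to include
--
--     Returns:
--         Formatted conversation context string
--     """
--     if not conversation_history:
--         return ""
--
--     # Take recent history that fits within max_context_length
--     context_parts = []
--     current_length = 0
--
--     # Process in reverse order to get most recent messages first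
--     for msg in reversed(conversation_history):
--         role = msg.get("role", "user")
--         content = msg.get("content", "")
--
--         if role == "user":
--             formatted_msg = f"User: {content}"
--         elif role == "assistant":
--             formatted_msg = f"Assistant: {content}"
--         else:
--             continue
--
--         # Check if adding this message would exceed max length
--         if current_length + len(formatted_msg) > max_context_length:
--             break
--
--         context_parts.insert(
--             0, formatted_msg
--         )  # Insert at beginning to maintain order
--         current_length += len(formatted_msg)
--
--     return "\n".join(context_parts)
-- ===== SOURCE B (Python) =====
-- def prepare_conversation_context(conversation_history, max_context_length=2000):
--     # Pass 1: format user/assistant messages in original order, dropping others.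
--     formatted = []
--     for msg in conversation_history:
--         role = msg.get("role", "user")
--         if role == "user":
--             formatted.append(f"User: {msg.get('content', '')}")
--         elif role == "assistant":
--             formatted.append(f"Assistant: {msg.get('content', '')}")
--     # Pass 2: count how many of the most recent formatted messages fit greedily.
--     keep = 0
--     total = 0
--     for f in reversed(formatted):
--         if total + len(f) > max_context_length:
--             break
--         total += len(f)
--         keep += 1
--     return "\n".join(formatted[len(formatted) - keep:])
-- ===== Notes on version B (the rewrite author's own statement) =====
-- stated objective: alternative
-- what changed: Replaces A's single reversed loop that interleaves formatting, length accounting and front-insertion with a two-pass structure: first build the in-order list of formatted user/assistant messages, then a second pass from the end counts how many recent messages fit, and the in-order suffix is joined.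
import Mathlib
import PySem

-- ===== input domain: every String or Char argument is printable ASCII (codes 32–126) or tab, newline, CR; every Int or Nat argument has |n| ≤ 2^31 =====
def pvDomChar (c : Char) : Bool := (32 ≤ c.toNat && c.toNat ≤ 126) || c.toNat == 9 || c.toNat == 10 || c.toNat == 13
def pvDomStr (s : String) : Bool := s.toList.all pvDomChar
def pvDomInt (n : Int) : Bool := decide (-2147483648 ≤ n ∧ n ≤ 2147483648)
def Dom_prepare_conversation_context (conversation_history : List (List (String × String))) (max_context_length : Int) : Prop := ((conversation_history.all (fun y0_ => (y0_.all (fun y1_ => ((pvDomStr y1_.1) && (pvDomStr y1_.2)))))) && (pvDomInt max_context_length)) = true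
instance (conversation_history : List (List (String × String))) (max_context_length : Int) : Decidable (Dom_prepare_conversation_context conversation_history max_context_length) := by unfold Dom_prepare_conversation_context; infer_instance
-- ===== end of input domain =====

-- B restructures A's single reversed loop into build-formatted-list then count-fitting-suffix (alternative decomposition; return value proved equal on all inputs).


-- ===== PORT A =====
-- A's reversed loop: format, break when it no longer fits, insert at the front.
def pvALoop (max_context_length : Int) : List (List (String × String)) → List String → Int → List String
  | [], parts, _ => parts
  | msg :: rest, parts, cl =>
    let role := (PySem.Dict.mk msg).getD "role" "user"
    let content := (PySem.Dict.mk msg).getD "content" ""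
    if role = "user" then
      let f := "User: " ++ content
      if cl + PySem.Str.len f > max_context_length then parts
      else pvALoop max_context_length rest (f :: parts) (cl + PySem.Str.len f)
    else if role = "assistant" then
      let f := "Assistant: " ++ content
      if cl + PySem.Str.len f > max_context_length then parts
      else pvALoop max_context_length rest (f :: parts) (cl + PySem.Str.len f)
    else pvALoop max_context_length rest parts cl

def prepare_conversation_context (conversation_history : List (List (String × String))) (max_context_length : Int) : String :=
  if conversation_history = [] then ""
  else PySem.Str.join "\n" (pvALoop max_context_length conversation_history.reverse [] 0)

-- ===== PORT B =====
-- B pass 1: format a user/assistant message, none for any other role.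
def pvFmtB (msg : List (String × String)) : Option String :=
  let role := (PySem.Dict.mk msg).getD "role" "user"
  if role = "user" then some ("User: " ++ (PySem.Dict.mk msg).getD "content" "")
  else if role = "assistant" then some ("Assistant: " ++ (PySem.Dict.mk msg).getD "content" "")
  else none

-- B pass 2: how many of the most recent formatted messages (given reversed) fit greedily.
def pvKeep (max_context_length : Int) : List String → Int → Nat
  | [], _ => 0
  | f :: rest, total =>
    if total + PySem.Str.len f > max_context_length then 0
    else 1 + pvKeep max_context_length rest (total + PySem.Str.len f)

def prepare_conversation_context_alt (conversation_history : List (List (String × String))) (max_context_length : Int) : String :=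
  let formatted := conversation_history.filterMap pvFmtB
  let keep := pvKeep max_context_length formatted.reverse 0
  PySem.Str.join "\n" (formatted.drop (formatted.length - keep))

-- ===== PRECONDITION & SPEC =====
def Spec_prepare_conversation_context (conversation_history : List (List (String × String))) (max_context_length : Int) (out : String) : Prop := out = prepare_conversation_context_alt conversation_history max_context_length
instance (conversation_history : List (List (String × String))) (max_context_length : Int) (out : String) : Decidable (Spec_prepare_conversation_context conversation_history max_context_length out) := by unfold Spec_prepare_conversation_context; infer_instance

-- ===== CLAIM (what is proved, stated in full; the proofs are below) =====
def Claim_equal_prepare_conversation_context : Prop := ∀ (conversation_history : List (List (String × String))) (max_context_length : Int), Dom_prepare_conversation_context conversation_history max_context_length → Spec_prepare_conversation_context conversation_history max_context_length (prepare_conversation_context conversation_history max_context_length)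

-- ===== LEMMAS AND PROOFS =====

-- A's loop over raw messages equals the same accumulate-and-break loop over the formatted strings.
def pvLoopF (max_context_length : Int) : List String → List String → Int → List String
  | [], parts, _ => parts
  | f :: rest, parts, cl =>
    if cl + PySem.Str.len f > max_context_length then parts
    else pvLoopF max_context_length rest (f :: parts) (cl + PySem.Str.len f)

theorem pvALoop_eq_loopF (m : Int) (msgs : List (List (String × String))) (parts : List String) (cl : Int) :
    pvALoop m msgs parts cl = pvLoopF m (msgs.filterMap pvFmtB) parts cl := by
  induction msgs generalizing parts cl with
  | nil => rfl
  | cons msg rest ih =>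
    rw [List.filterMap_cons]
    by_cases h1 : (PySem.Dict.mk msg).getD "role" "user" = "user"
    · have hf : pvFmtB msg = some ("User: " ++ (PySem.Dict.mk msg).getD "content" "") := by
        simp [pvFmtB, h1]
      rw [hf]
      simp only [pvALoop, pvLoopF]
      rw [if_pos h1]
      split
      · rfl
      · exact ih _ _
    · by_cases h2 : (PySem.Dict.mk msg).getD "role" "user" = "assistant"
      · have hf : pvFmtB msg = some ("Assistant: " ++ (PySem.Dict.mk msg).getD "content" "") := by
          simp [pvFmtB, h2]
        rw [hf]
        simp only [pvALoop, pvLoopF]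
        rw [if_neg h1, if_pos h2]
        split
        · rfl
        · exact ih _ _
      · have hf : pvFmtB msg = none := by simp [pvFmtB, h1, h2]
        rw [hf]
        simp only [pvALoop]
        rw [if_neg h1, if_neg h2]
        exact ih _ _

theorem pvKeep_le_length (m : Int) (l : List String) (cl : Int) : pvKeep m l cl ≤ l.length := by
  induction l generalizing cl with
  | nil => simp [pvKeep]
  | cons f rest ih =>
    simp only [pvKeep, List.length_cons]
    split
    · omega
    · have := ih (cl + PySem.Str.len f); omega

-- the accumulate-and-break loop keeps exactly the pvKeep-long prefix of its (reversed) input, re-reversed.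
theorem pvLoopF_eq_take (m : Int) (l : List String) (parts : List String) (cl : Int) :
    pvLoopF m l parts cl = (l.take (pvKeep m l cl)).reverse ++ parts := by
  induction l generalizing parts cl with
  | nil => simp [pvLoopF, pvKeep]
  | cons f rest ih =>
    simp only [pvLoopF, pvKeep]
    split
    · simp
    · rw [ih, Nat.add_comm 1, List.take_succ_cons]
      simp

theorem prepare_conversation_context_spec : Claim_equal_prepare_conversation_context := by
  intro h m _
  show prepare_conversation_context h m = prepare_conversation_context_alt h m
  unfold prepare_conversation_context prepare_conversation_context_alt
  by_cases he : h = []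
  · subst he; rfl
  · rw [if_neg he, pvALoop_eq_loopF, List.filterMap_reverse, pvLoopF_eq_take]
    have hk := pvKeep_le_length m (h.filterMap pvFmtB).reverse 0
    simp only [List.length_reverse] at hk
    rw [List.take_reverse, List.reverse_reverse, List.append_nil]
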